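-- pv_equiv track=rewrite | github.com/ryancey1/Rosalind | Algorithmic-Heights/algorithmic_heights.py | verify_partition
-- ===== SOURCE A (Python) =====
-- def verify_partition(arr, pivot, first = True):
--     for i in arr:
--         if first and i > pivot:
--             return False
--         elif first and i == pivot:
--             first = False
--         if not first and i < pivot:
--             return False
--     return True
-- ===== SOURCE B (Python) =====
-- def verify_partition(arr, pivot, first=True):
--     lst = list(arr)
--     if first:
--         try:
--             j = lst.index(pivot)
--         except ValueError:
--             j = len(lst)
--     else:
--         j = 0
--     return all(x <= pivot for x in lst[:j]) and all(x >= pivot for x in lst[j:])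
-- ===== Notes on version B (the rewrite author's own statement) =====
-- stated objective: alternative
-- what changed: Replaces A's single scan with a mutating 'first' flag by an explicit boundary decomposition: find the index of the first occurrence of the pivot (or the list end / start depending on 'first') and check <= on the prefix and >= on the suffix.
import Mathlib
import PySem

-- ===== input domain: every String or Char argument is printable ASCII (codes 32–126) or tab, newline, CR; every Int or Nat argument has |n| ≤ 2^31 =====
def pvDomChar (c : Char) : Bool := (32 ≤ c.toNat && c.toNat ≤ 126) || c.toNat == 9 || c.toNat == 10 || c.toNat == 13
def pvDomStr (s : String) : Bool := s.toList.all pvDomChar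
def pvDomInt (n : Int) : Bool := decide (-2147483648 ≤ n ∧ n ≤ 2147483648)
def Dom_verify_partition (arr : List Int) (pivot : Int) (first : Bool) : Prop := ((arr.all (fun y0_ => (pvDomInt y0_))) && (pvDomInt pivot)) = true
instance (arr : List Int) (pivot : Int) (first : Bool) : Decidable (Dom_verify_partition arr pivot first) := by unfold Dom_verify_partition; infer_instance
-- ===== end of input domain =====

-- B replaces A's scan with a mutating `first` flag by an explicit boundary decomposition: find the pivot's first index (or the end / the start), then check ≤ on the prefix and ≥ on the suffix; same O(n) cost (objective: alternative).


-- ===== PORT A =====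
def verify_partition (arr : List Int) (pivot : Int) (first : Bool) : Bool :=
  match arr with
  | [] => true
  | i :: rest =>
    if first && decide (i > pivot) then false
    else
      let first' := if first && decide (i = pivot) then false else first
      if (!first') && decide (i < pivot) then false
      else verify_partition rest pivot first' 

-- ===== PORT B =====
def verify_partition_alt (arr : List Int) (pivot : Int) (first : Bool) : Bool :=
  -- boundary index j: first occurrence of pivot (or end) when first, else 0
  let j : Nat :=
    if first then
      match PySem.List.index? arr pivot with
      | some k => k
      | none => arr.length
    else 0
  (arr.take j).all (fun x => decide (x ≤ pivot)) && (arr.drop j).all (fun x => decide (x ≥ pivot))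

-- ===== PRECONDITION & SPEC =====
def Spec_verify_partition (arr : List Int) (pivot : Int) (first : Bool) (out : Bool) : Prop := out = verify_partition_alt arr pivot first
instance (arr : List Int) (pivot : Int) (first : Bool) (out : Bool) : Decidable (Spec_verify_partition arr pivot first out) := by unfold Spec_verify_partition; infer_instance

-- ===== CLAIM (what is proved, stated in full; the proofs are below) =====
def Claim_equal_verify_partition : Prop := ∀ (arr : List Int) (pivot : Int) (first : Bool), Dom_verify_partition arr pivot first → Spec_verify_partition arr pivot first (verify_partition arr pivot first)

-- ===== LEMMAS AND PROOFS =====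

-- ===== VERDICT (by name: the statement is the Claim_ definition above) =====
lemma alt_false (arr : List Int) (pivot : Int) :
    verify_partition_alt arr pivot false = arr.all (fun x => decide (x ≥ pivot)) := by
  simp [verify_partition_alt]

lemma a_false (arr : List Int) (pivot : Int) :
    verify_partition arr pivot false = arr.all (fun x => decide (x ≥ pivot)) := by
  induction arr with
  | nil => simp [verify_partition]
  | cons i rest ih =>
    by_cases h : i < pivot
    · simp [verify_partition, h, not_le.mpr h]
    · simp [verify_partition, h, ih, not_lt.mp h]

lemma a_eq_alt (arr : List Int) (pivot : Int) (first : Bool) :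
    verify_partition arr pivot first = verify_partition_alt arr pivot first := by
  cases first with
  | false => rw [a_false, alt_false]
  | true =>
    induction arr with
    | nil => simp [verify_partition, verify_partition_alt]
    | cons i rest ih =>
      by_cases hp : i = pivot
      · subst hp
        rw [show verify_partition (i :: rest) i true
              = verify_partition rest i false by simp [verify_partition]]
        rw [a_false]
        simp only [verify_partition_alt, PySem.List.index?_cons_self]
        simp
      · have hidx : PySem.List.index? (i :: rest) pivot
            = (PySem.List.index? rest pivot).map (· + 1) :=
          PySem.List.index?_cons_of_ne rest hp
        by_cases hg : i > pivot
        · -- A returns false; B's prefix contains i with i ≤ pivot false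
          have hB : verify_partition_alt (i :: rest) pivot true = false := by
            simp only [verify_partition_alt, hidx]
            cases h : PySem.List.index? rest pivot with
            | none => simp [List.all_cons]; omega
            | some k => simp [List.all_cons]; omega
          simp [verify_partition, hg, hB]
        · -- i < pivot (since i ≠ pivot, ¬ i > pivot): A recurses with first = true
          have hlt : i < pivot := by omega
          have hA : verify_partition (i :: rest) pivot true = verify_partition rest pivot true := by
            simp [verify_partition, hp, not_lt.mpr (le_of_lt hlt)]
          have hB : verify_partition_alt (i :: rest) pivot true
              = verify_partition_alt rest pivot true := by
            simp only [verify_partition_alt, hidx]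
            cases h : PySem.List.index? rest pivot with
            | none => simp [List.all_cons, le_of_lt hlt]
            | some k => simp [List.all_cons, le_of_lt hlt]
          rw [hA, hB, ih]

-- ===== VERDICT (by name: the statement is the Claim_ definition above) =====
theorem verify_partition_spec : Claim_equal_verify_partition := by
  intro arr pivot first _
  unfold Spec_verify_partition
  exact a_eq_alt arr pivot first
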